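-- pv_equiv track=rewrite | github.com/AdityaK85/KoffeeKodes_Test | KK_python_test/KK_pythonTest.py | generate_prime_string
-- ===== SOURCE A (Python) =====
-- def is_prime(num):
--     if num <= 1:
--         return False
--     if num <= 3:
--         return True
--     if num % 2 == 0 or num % 3 == 0:
--         return False
--     i = 5
--     while i * i <= num:
--         if num % i == 0 or num % (i + 2) == 0:
--             return False
--         i += 6
--     return True
--
-- def generate_prime_string(limit):
--     prime_string = ""
--     num = 2
--     while len(prime_string) < limit:
--         if is_prime(num):
--             prime_string += str(num)
--         num += 1
--     return prime_string
-- ===== SOURCE B (Python) =====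
-- def _coprime_to_found(num, primes):
--     # primes holds every prime below num, in increasing order
--     for p in primes:
--         if p * p > num:
--             break
--         if num % p == 0:
--             return False
--     return True
--
--
-- def generate_prime_string(limit):
--     primes = []   # primes found so far, increasing
--     parts = []    # their decimal representations
--     total = 0     # sum of the lengths of parts
--     num = 2
--     while total < limit:
--         if _coprime_to_found(num, primes):
--             primes.append(num)
--             s = str(num)
--             parts.append(s)
--             total += len(s)
--         num += 1
--     return "".join(parts)
-- ===== Notes on version B (the rewrite author's own statement) =====
-- stated objective: faster
-- what changed: B keeps the list of primes found so far and tests each candidate only against those primes up to its square root (stopping at the first p with p*p > num), collecting the decimal strings in a list joined once at the end, instead of A's per-candidate 6k±1 trial-division scan with repeated string concatenation.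
import Mathlib
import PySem

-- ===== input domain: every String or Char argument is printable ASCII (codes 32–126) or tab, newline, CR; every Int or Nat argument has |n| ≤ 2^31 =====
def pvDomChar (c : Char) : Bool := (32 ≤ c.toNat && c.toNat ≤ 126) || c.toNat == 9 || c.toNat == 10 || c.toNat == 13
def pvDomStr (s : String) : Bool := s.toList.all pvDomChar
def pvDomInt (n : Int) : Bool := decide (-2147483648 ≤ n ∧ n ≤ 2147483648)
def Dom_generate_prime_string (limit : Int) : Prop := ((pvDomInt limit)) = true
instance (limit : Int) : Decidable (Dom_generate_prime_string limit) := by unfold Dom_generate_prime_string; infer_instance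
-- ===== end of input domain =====

-- B replaces A's per-candidate 6k±1 trial division and repeated string concatenation by trial
-- division against the list of primes found so far (stopping at p*p > num) and a single join.


-- ===== PORT A =====
-- A's is_prime: the 6k±1 trial-division loop.  The loop is only entered with num ≥ 4 and
-- i ≥ 5, where Python's int arithmetic coincides with Nat arithmetic, so it runs on Nat.
def isPrimeLoop (n : Nat) (i : Nat) : Bool :=
  if _h : i * i ≤ n then
    if n % i = 0 || n % (i + 2) = 0 then false
    else isPrimeLoop n (i + 6)
  else true
termination_by n + 1 - i
decreasing_by
  have hi : i ≤ n := by
    rcases Nat.eq_zero_or_pos i with h0 | h1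
    · omega
    · nlinarith
  omega

def is_prime (num : Int) : Bool :=
  if num ≤ 1 then false
  else if num ≤ 3 then true
  else if PySem.Int.mod num 2 = 0 || PySem.Int.mod num 3 = 0 then false
  else isPrimeLoop num.toNat 5   -- num ≥ 4 here, so .toNat is exact

-- termination helpers for the two while-loops (cited in the decreasing_by blocks below;
-- the loops only make progress towards `limit` at primes, so termination needs the easy
-- direction of the primality tests' correctness and the infinitude of primes)
lemma isPrimeLoop_true_of_prime (n : Nat) (hp : Nat.Prime n) :
    ∀ i, 2 ≤ i → isPrimeLoop n i = true := by
  intro i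
  induction i using isPrimeLoop.induct n with
  | case1 i h hdvd =>
    intro h2
    exfalso
    simp only [Bool.or_eq_true, decide_eq_true_eq] at hdvd
    rcases hdvd with hmod | hmod
    · rcases hp.eq_one_or_self_of_dvd i (Nat.dvd_of_mod_eq_zero hmod) with h1 | h1
      · omega
      · nlinarith
    · rcases hp.eq_one_or_self_of_dvd (i + 2) (Nat.dvd_of_mod_eq_zero hmod) with h1 | h1
      · omega
      · have hi : i ≤ 2 := by nlinarith
        have hi2 : i = 2 := by omega
        subst hi2
        have hn : n = 4 := by omega
        subst hn
        exact absurd hp (by norm_num)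
  | case2 i h hdvd ih =>
    intro _
    rw [isPrimeLoop]
    simp only [h, dif_pos]
    rw [if_neg hdvd]
    exact ih (by omega)
  | case3 i h =>
    intro _
    rw [isPrimeLoop]
    simp [h]

lemma is_prime_of_prime (n : Nat) (hp : Nat.Prime n) : is_prime (n : Int) = true := by
  have h2 := hp.two_le
  unfold is_prime
  split_ifs with ha hb hc
  · exfalso
    have : (2 : Int) ≤ (n : Int) := by exact_mod_cast h2
    omega
  · rfl
  · exfalso
    simp only [Bool.or_eq_true, decide_eq_true_eq] at hc
    have hb' : ¬ n ≤ 3 := by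
      intro h; exact hb (by exact_mod_cast h)
    rcases hc with hm | hm
    · have hdvd : (2 : Int) ∣ (n : Int) := (PySem.Int.mod_eq_zero_iff_dvd _ _).mp hm
      have : 2 ∣ n := by exact_mod_cast hdvd
      rcases hp.eq_one_or_self_of_dvd 2 this with h1 | h1 <;> omega
    · have hdvd : (3 : Int) ∣ (n : Int) := (PySem.Int.mod_eq_zero_iff_dvd _ _).mp hm
      have : 3 ∣ n := by exact_mod_cast hdvd
      rcases hp.eq_one_or_self_of_dvd 3 this with h1 | h1 <;> omega
  · rw [Int.toNat_natCast]
    exact isPrimeLoop_true_of_prime n hp 5 (by omega)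

def nextPrime (n : Nat) : Nat := Nat.find (Nat.exists_infinite_primes n)

lemma nextPrime_measure (n : Nat) (h : ¬ Nat.Prime n) :
    nextPrime (n + 1) - (n + 1) < nextPrime n - n := by
  have hs := Nat.find_spec (Nat.exists_infinite_primes n)
  have hne : nextPrime n ≠ n := fun he => h (he ▸ hs.2)
  have h1 : n + 1 ≤ nextPrime n := by
    have := hs.1
    unfold nextPrime at *
    omega
  have h2 : nextPrime (n + 1) ≤ nextPrime n := Nat.find_le ⟨h1, hs.2⟩
  have h3 : n + 1 ≤ nextPrime (n + 1) :=
    (Nat.find_spec (Nat.exists_infinite_primes (n + 1))).1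
  omega

lemma toDigitsCore_len_mono : ∀ (fuel n : Nat) (ds : List Char),
    ds.length ≤ (Nat.toDigitsCore 10 fuel n ds).length := by
  intro fuel
  induction fuel with
  | zero => intro n ds; simp [Nat.toDigitsCore]
  | succ f ih =>
    intro n ds
    simp only [Nat.toDigitsCore]
    split
    · simp
    · exact le_trans (by simp) (ih _ _)

lemma toChars_len_pos (k : Int) : 1 ≤ (PySem.Int.toChars k).length := by
  unfold PySem.Int.toChars
  split
  · simp
  · show 1 ≤ (Nat.toDigits 10 k.toNat).length
    unfold Nat.toDigits
    simp only [Nat.toDigitsCore]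
    split
    · simp
    · exact le_trans (by simp) (toDigitsCore_len_mono _ _ _)

-- A's main loop: prime_string is carried as List Char (the exact character sequence of the
-- Python str); num starts at 2 and only increases, so it is ported as Nat (exact).
def loopA (limit : Int) (s : List Char) (num : Nat) : List Char :=
  if _h : (s.length : Int) < limit then
    if hp : is_prime (num : Int) = true then
      loopA limit (s ++ PySem.Int.toChars (num : Int)) (num + 1)
    else
      loopA limit s (num + 1)
  else s
termination_by ((limit - s.length).toNat, nextPrime num - num)
decreasing_by
  · apply Prod.Lex.left
    have := toChars_len_pos (num : Int)
    simp only [List.length_append]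
    omega
  · apply Prod.Lex.right
    apply nextPrime_measure
    intro hpr
    exact hp (is_prime_of_prime num hpr)

def generate_prime_string (limit : Int) : String :=
  String.ofList (loopA limit [] 2)

-- ===== PORT B =====
-- B's _coprime_to_found: scan the stored primes, break at p*p > num, fail on a divisor.
def coprimeLoop (num : Nat) (ps : List Nat) : Bool :=
  match ps with
  | [] => true
  | p :: rest =>
    if num < p * p then true            -- the `break`
    else if num % p = 0 then false
    else coprimeLoop num rest

lemma not_prime_of_sq_divisor (p n : Nat) (h2 : 2 ≤ p) (hsq : p * p ≤ n) (hdvd : p ∣ n) :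
    ¬ Nat.Prime n := by
  intro hp
  rcases hp.eq_one_or_self_of_dvd p hdvd with h | h
  · omega
  · nlinarith

lemma coprimeLoop_false_exists (num : Nat) :
    ∀ ps, coprimeLoop num ps = false → ∃ p ∈ ps, p * p ≤ num ∧ num % p = 0 := by
  intro ps
  induction ps with
  | nil => simp [coprimeLoop]
  | cons p rest ih =>
    intro h
    rw [coprimeLoop] at h
    by_cases h1 : num < p * p
    · simp [h1] at h
    · by_cases h2 : num % p = 0
      · exact ⟨p, by simp, by omega, h2⟩
      · simp only [if_neg h1, if_neg h2] at h
        obtain ⟨q, hq, hrest⟩ := ih h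
        exact ⟨q, by simp [hq], hrest⟩

-- B's main loop.  primes, parts, total, num are B's variables (ints ≥ 0 as Nat where noted:
-- num and the stored primes start at 2 and only grow).  The two hypothesis arguments record
-- facts B's caller guarantees; they are needed for termination only.
def loopB (limit : Int) (primes : List Nat) (parts : List (List Char)) (total : Int) (num : Nat)
    (hps : ∀ p ∈ primes, 2 ≤ p) (hnum : 2 ≤ num) : List (List Char) :=
  if _h : total < limit then
    if hc : coprimeLoop num primes = true then
      loopB limit (primes ++ [num]) (parts ++ [PySem.Int.toChars (num : Int)])
        (total + ((PySem.Int.toChars (num : Int)).length : Int)) (num + 1)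
        (by intro p hp
            rcases List.mem_append.mp hp with h | h
            · exact hps p h
            · simp only [List.mem_singleton] at h
              omega)
        (by omega)
    else
      loopB limit primes parts total (num + 1) hps (by omega)
  else parts
termination_by ((limit - total).toNat, nextPrime num - num)
decreasing_by
  · apply Prod.Lex.left
    have := toChars_len_pos (num : Int)
    omega
  · apply Prod.Lex.right
    apply nextPrime_measure
    obtain ⟨p, hmem, hsq, hmod⟩ :=
      coprimeLoop_false_exists num primes (by revert hc; cases coprimeLoop num primes <;> simp)
    exact not_prime_of_sq_divisor p num (hps p hmem) hsq (Nat.dvd_of_mod_eq_zero hmod)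

def generate_prime_string_alt (limit : Int) : String :=
  String.ofList (loopB limit [] [] 0 2 (by simp) (by omega)).flatten   -- "".join(parts)

-- ===== PRECONDITION & SPEC =====
def Spec_generate_prime_string (limit : Int) (out : String) : Prop := out = generate_prime_string_alt limit
instance (limit : Int) (out : String) : Decidable (Spec_generate_prime_string limit out) := by unfold Spec_generate_prime_string; infer_instance

-- ===== CLAIM (what is proved, stated in full; the proofs are below) =====
def Claim_equal_generate_prime_string : Prop := ∀ (limit : Int), Dom_generate_prime_string limit → Spec_generate_prime_string limit (generate_prime_string limit)

-- ===== LEMMAS AND PROOFS =====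

-- the hard direction of A's test: a composite number is caught by the 6k±1 scan
lemma isPrimeLoop_false_reach (n p : Nat) (hdvd : p ∣ n) (hsq : p * p ≤ n)
    (hmod6 : p % 6 = 1 ∨ p % 6 = 5) :
    ∀ i, i % 6 = 5 → i ≤ p → isPrimeLoop n i = false := by
  have hnp : n % p = 0 := Nat.mod_eq_zero_of_dvd hdvd
  intro i
  induction i using isPrimeLoop.induct n with
  | case1 i h hd =>
    intro _ _
    rw [isPrimeLoop]
    simp only [h, dif_pos]
    rw [if_pos hd]
  | case2 i h hd ih =>
    intro hi6 hip
    simp only [Bool.or_eq_true, decide_eq_true_eq, not_or] at hd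
    have hpi : p ≠ i := by rintro rfl; exact hd.1 hnp
    have hpi2 : p ≠ i + 2 := by rintro rfl; exact hd.2 hnp
    -- i ≡ 5 (mod 6), p ≡ 1 or 5 (mod 6), i ≤ p, p ∉ {i, i+2} ⟹ i + 6 ≤ p
    have h6 : i + 6 ≤ p := by rcases hmod6 with hm | hm <;> omega
    rw [isPrimeLoop]
    simp only [h, dif_pos]
    rw [if_neg (by simp only [Bool.or_eq_true, decide_eq_true_eq]; tauto)]
    exact ih (by omega) h6
  | case3 i h =>
    intro _ hip
    exfalso
    exact h (le_trans (Nat.mul_le_mul hip hip) hsq)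

lemma is_prime_eq (n : Nat) (h2 : 2 ≤ n) : is_prime (n : Int) = decide (Nat.Prime n) := by
  by_cases hp : Nat.Prime n
  · simp [is_prime_of_prime n hp, hp]
  · simp only [hp, decide_false]
    unfold is_prime
    have hn3 : ¬ n ≤ 3 := by
      intro h3
      have : n = 2 ∨ n = 3 := by omega
      rcases this with rfl | rfl
      · exact hp Nat.prime_two
      · exact hp Nat.prime_three
    rw [if_neg (by exact_mod_cast (by omega : ¬ (n : Int) ≤ 1)),
        if_neg (by exact_mod_cast (by exact_mod_cast hn3 : ¬ (n : Int) ≤ 3))]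
    by_cases hd : 2 ∣ n ∨ 3 ∣ n
    · rw [if_pos]
      simp only [Bool.or_eq_true, decide_eq_true_eq, PySem.Int.mod_eq_zero_iff_dvd]
      rcases hd with hd | hd
      · left; exact_mod_cast hd
      · right; exact_mod_cast hd
    · push Not at hd
      rw [if_neg (by
        simp only [Bool.or_eq_true, decide_eq_true_eq, PySem.Int.mod_eq_zero_iff_dvd, not_or]
        constructor
        · intro h; exact hd.1 (by exact_mod_cast h)
        · intro h; exact hd.2 (by exact_mod_cast h))]
      rw [Int.toNat_natCast]
      have hpp : Nat.Prime n.minFac := Nat.minFac_prime (by omega)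
      have hdvd := Nat.minFac_dvd n
      have hsq : n.minFac * n.minFac ≤ n := by
        have := Nat.minFac_sq_le_self (by omega) hp
        nlinarith [this]
      have hne2 : n.minFac ≠ 2 := by rintro he; exact hd.1 (he ▸ hdvd)
      have hne3 : n.minFac ≠ 3 := by rintro he; exact hd.2 (he ▸ hdvd)
      have hne4 : n.minFac ≠ 4 := by rintro he; exact absurd (he ▸ hpp) (by norm_num)
      have h5 : 5 ≤ n.minFac := by have := hpp.two_le; omega
      have hm2 : ¬ 2 ∣ n.minFac := by
        intro h
        rcases hpp.eq_one_or_self_of_dvd 2 h with h1 | h1 <;> omega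
      have hm3 : ¬ 3 ∣ n.minFac := by
        intro h
        rcases hpp.eq_one_or_self_of_dvd 3 h with h1 | h1 <;> omega
      have hmod6 : n.minFac % 6 = 1 ∨ n.minFac % 6 = 5 := by
        rw [Nat.dvd_iff_mod_eq_zero] at hm2 hm3
        omega
      exact isPrimeLoop_false_reach n n.minFac hdvd hsq hmod6 5 (by norm_num) h5

-- the primes B has stored when the counter is at num: all primes below num, in order
def primesBelow (n : Nat) : List Nat := (List.range n).filter (fun p => decide (Nat.Prime p))

lemma mem_primesBelow (q n : Nat) : q ∈ primesBelow n ↔ q < n ∧ Nat.Prime q := by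
  simp [primesBelow, List.mem_filter, List.mem_range]

lemma primesBelow_two_le (n : Nat) : ∀ p ∈ primesBelow n, 2 ≤ p := by
  intro p hp
  exact ((mem_primesBelow p n).mp hp).2.two_le

lemma primesBelow_pairwise (n : Nat) : (primesBelow n).Pairwise (· < ·) :=
  List.Pairwise.sublist List.filter_sublist List.pairwise_lt_range

lemma primesBelow_succ_prime (n : Nat) (h : Nat.Prime n) :
    primesBelow (n + 1) = primesBelow n ++ [n] := by
  unfold primesBelow
  rw [List.range_succ, List.filter_append]
  simp [h]

lemma primesBelow_succ_not (n : Nat) (h : ¬ Nat.Prime n) :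
    primesBelow (n + 1) = primesBelow n := by
  unfold primesBelow
  rw [List.range_succ, List.filter_append]
  simp [h]

-- B's test, characterised on a sorted list of trial divisors
lemma coprimeLoop_eq (n : Nat) :
    ∀ ps, ps.Pairwise (· < ·) → (∀ p ∈ ps, 2 ≤ p) →
      coprimeLoop n ps = decide (∀ p ∈ ps, p * p ≤ n → ¬ (p ∣ n)) := by
  intro ps
  induction ps with
  | nil => simp [coprimeLoop]
  | cons p rest ih =>
    intro hpw h2
    rw [coprimeLoop]
    by_cases h1 : n < p * p
    · rw [if_pos h1]
      symm
      simp only [decide_eq_true_eq]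
      intro q hq hsq
      exfalso
      rcases List.mem_cons.mp hq with rfl | hq'
      · omega
      · have hlt : p < q := (List.pairwise_cons.mp hpw).1 q hq'
        have : p * p < q * q := by nlinarith
        omega
    · rw [if_neg h1]
      by_cases hm : n % p = 0
      · rw [if_pos hm]
        symm
        simp only [decide_eq_false_iff_not, not_forall]
        refine ⟨p, by simp, by omega, ?_⟩
        simp only [not_not]
        exact Nat.dvd_of_mod_eq_zero hm
      · rw [if_neg hm]
        rw [ih (List.pairwise_cons.mp hpw).2 (fun q hq => h2 q (by simp [hq]))]
        apply decide_eq_decide.mpr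
        constructor
        · intro hall q hq hsq
          rcases List.mem_cons.mp hq with rfl | hq'
          · intro hd
            exact hm (Nat.mod_eq_zero_of_dvd hd)
          · exact hall q hq' hsq
        · intro hall q hq hsq
          exact hall q (by simp [hq]) hsq

lemma coprime_primesBelow (n : Nat) (h2 : 2 ≤ n) :
    coprimeLoop n (primesBelow n) = decide (Nat.Prime n) := by
  rw [coprimeLoop_eq n (primesBelow n) (primesBelow_pairwise n) (primesBelow_two_le n)]
  apply decide_eq_decide.mpr
  constructor
  · intro hall
    by_contra hnp
    have hpf : Nat.Prime n.minFac := Nat.minFac_prime (by omega)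
    have hdvd := Nat.minFac_dvd n
    have hsq : n.minFac * n.minFac ≤ n := by
      have := Nat.minFac_sq_le_self (by omega) hnp
      nlinarith [this]
    have hlt : n.minFac < n := by nlinarith [hpf.two_le]
    exact hall n.minFac ((mem_primesBelow _ _).mpr ⟨hlt, hpf⟩) hsq hdvd
  · intro hp q hq hsq hdvd
    obtain ⟨hlt, hqp⟩ := (mem_primesBelow q n).mp hq
    rcases hp.eq_one_or_self_of_dvd q hdvd with h | h
    · exact absurd h (by have := hqp.two_le; omega)
    · omega

-- the two loops in lockstep
lemma loop_eq :
    ∀ (limit : Int) (s : List Char) (num : Nat) (h2 : 2 ≤ num) (primes : List Nat)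
      (parts : List (List Char)) (total : Int) (hps : ∀ p ∈ primes, 2 ≤ p),
      primes = primesBelow num → total = (s.length : Int) → s = parts.flatten →
      loopA limit s num = (loopB limit primes parts total num hps h2).flatten := by
  intro limit s num
  induction s, num using loopA.induct limit with
  | case1 s num hcond hp ih =>
    intro h2 primes parts total hps hpr htot hflat
    have hnp : Nat.Prime num := of_decide_eq_true ((is_prime_eq num h2) ▸ hp)
    have hcop : coprimeLoop num (primesBelow num) = true := by
      rw [coprime_primesBelow num h2]; simp [hnp]
    subst hpr htot hflat
    rw [loopA, dif_pos hcond, dif_pos hp]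
    rw [loopB, dif_pos hcond, dif_pos hcop]
    apply ih (by omega)
    · rw [primesBelow_succ_prime num hnp]
    · push_cast [List.length_append]; ring
    · simp
  | case2 s num hcond hp ih =>
    intro h2 primes parts total hps hpr htot hflat
    have hnp : ¬ Nat.Prime num := by
      intro h; exact hp (is_prime_of_prime num h)
    have hcop : ¬ coprimeLoop num (primesBelow num) = true := by
      rw [coprime_primesBelow num h2]; simp [hnp]
    subst hpr htot hflat
    rw [loopA, dif_pos hcond, dif_neg hp]
    rw [loopB, dif_pos hcond, dif_neg hcop]
    apply ih (by omega)
    · rw [primesBelow_succ_not num hnp]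
    · rfl
    · rfl
  | case3 s num hcond =>
    intro h2 primes parts total hps hpr htot hflat
    subst hpr htot hflat
    rw [loopA, dif_neg hcond, loopB, dif_neg hcond]

-- ===== VERDICT (by name: the statement is the Claim_ definition above) =====
theorem generate_prime_string_spec : Claim_equal_generate_prime_string := by
  unfold Claim_equal_generate_prime_string
  intro limit _
  unfold Spec_generate_prime_string generate_prime_string generate_prime_string_alt
  apply congrArg String.ofList
  exact loop_eq limit [] 2 (by omega) [] [] 0 (by simp) (by decide) (by simp) (by simp)
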